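-- pv_equiv track=rewrite | github.com/start2012zz/2004A1 | A1.py | best_interval1
-- ===== SOURCE A (Python) =====
-- def best_interval1(transactions, t):
--     if transactions == []:
--         return (0, 0)
--     greatest = 0
--     best_int = 0
--     for number in range(max(transactions) + 1):
--         boundary = number + t
--         count = 0
--         for index in range(len(transactions)):
--             if boundary >= transactions[index] >= number:
--                 count += 1
--         if count > greatest:
--             greatest = count
--             best_int = number
--     return (best_int, greatest)
-- ===== SOURCE B (Python) =====
-- def best_interval1(transactions, t):
--     starts = {0}
--     for v in transactions:
--         s = v - t
--         if s > 0:
--             starts.add(s)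
--     best_s = 0
--     best_c = 0
--     for s in sorted(starts):
--         c = 0
--         for v in transactions:
--             if s <= v <= s + t:
--                 c += 1
--         if c > best_c:
--             best_c = c
--             best_s = s
--     return (best_s, best_c)
-- ===== Notes on version B (the rewrite author's own statement) =====
-- stated objective: faster
-- what changed: Instead of scanning every integer start in [0, max(transactions)] with a nested counting loop, B enumerates only the O(n) candidate window starts {0} and {v - t > 0 : v in transactions} (sorted, deduplicated), since the count can only reach a new maximum at such a start.
import Mathlib
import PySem

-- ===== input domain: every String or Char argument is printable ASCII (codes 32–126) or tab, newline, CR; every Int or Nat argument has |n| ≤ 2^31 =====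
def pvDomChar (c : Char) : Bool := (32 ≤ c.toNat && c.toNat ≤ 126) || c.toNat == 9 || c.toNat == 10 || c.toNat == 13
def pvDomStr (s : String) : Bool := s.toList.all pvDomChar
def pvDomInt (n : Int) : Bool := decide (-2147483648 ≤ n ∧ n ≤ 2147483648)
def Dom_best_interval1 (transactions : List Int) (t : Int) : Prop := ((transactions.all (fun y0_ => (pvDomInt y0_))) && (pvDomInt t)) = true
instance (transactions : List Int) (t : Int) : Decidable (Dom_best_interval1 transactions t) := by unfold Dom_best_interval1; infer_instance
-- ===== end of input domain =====

-- B replaces A's scan of every integer 0..max(transactions) by a scan of the O(n) candidate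
-- window starts {0} ∪ {v − t > 0 : v ∈ transactions} (asymptotically faster when max ≫ n).


-- ===== PORT A =====
def best_interval1 (transactions : List Int) (t : Int) : Int × Int :=
  if transactions = [] then (0, 0)
  else
    -- max(transactions): the list is nonempty on this branch, so max? is `some` and the default is never used
    let mx := (PySem.List.max? transactions (fun x => x)).getD 0
    let st := (PySem.List.pyRange 0 (mx + 1)).foldl
      (fun (st : Int × Int) number =>
        let boundary := number + t
        let count := (PySem.List.pyRange 0 (PySem.List.len transactions)).foldl
          (fun count index =>
            if boundary ≥ PySem.List.pyGetD transactions index 0 ∧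
               PySem.List.pyGetD transactions index 0 ≥ number then count + 1 else count)
          (0 : Int)
        if count > st.1 then (count, number) else st)
      ((0 : Int), (0 : Int))   -- (greatest, best_int)
    (st.2, st.1)

-- ===== PORT B =====
def best_interval1_alt (transactions : List Int) (t : Int) : Int × Int :=
  let starts : PySem.Set Int := transactions.foldl
    (fun st v => let s := v - t; if s > 0 then st.add s else st)
    (PySem.Set.ofList [0])
  let res := (PySem.List.sorted starts (fun x => x)).foldl
    (fun (st : Int × Int) s =>
      let c := transactions.foldl
        (fun c v => if s ≤ v ∧ v ≤ s + t then c + 1 else c) (0 : Int)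
      if c > st.1 then (c, s) else st)
    ((0 : Int), (0 : Int))   -- (best_c, best_s)
  (res.2, res.1)

-- ===== PRECONDITION & SPEC =====
def Spec_best_interval1 (transactions : List Int) (t : Int) (out : Int × Int) : Prop := out = best_interval1_alt transactions t
instance (transactions : List Int) (t : Int) (out : Int × Int) : Decidable (Spec_best_interval1 transactions t out) := by unfold Spec_best_interval1; infer_instance

-- ===== CLAIM (what is proved, stated in full; the proofs are below) =====
def Claim_equal_best_interval1 : Prop := ∀ (transactions : List Int) (t : Int), Dom_best_interval1 transactions t → Spec_best_interval1 transactions t (best_interval1 transactions t)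

-- ===== LEMMAS AND PROOFS =====

-- the common abstraction: number of transactions inside [s, s+t]
def pvCnt (txs : List Int) (t s : Int) : Int :=
  (txs.countP (fun v => decide (s ≤ v ∧ v ≤ s + t)) : Int)

-- one step of the "keep the first strict record" scan, and the scan itself
def pvStep (f : Int → Int) (st : Int × Int) (s : Int) : Int × Int :=
  if f s > st.1 then (f s, s) else st

def pvSel (f : Int → Int) (L : List Int) : Int × Int := L.foldl (pvStep f) (0, 0)

-- candidate predicate: window starts at which the count can strictly increase
def pvCand (txs : List Int) (t s : Int) : Bool := decide (s = 0 ∨ (0 < s ∧ s + t ∈ txs))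

lemma pvStep_fst_le (f : Int → Int) (st : Int × Int) (s : Int) :
    st.1 ≤ (pvStep f st s).1 := by
  unfold pvStep
  split_ifs with h
  · simp; omega
  · exact le_rfl

lemma pvStep_fst_ge_f (f : Int → Int) (st : Int × Int) (s : Int) :
    f s ≤ (pvStep f st s).1 := by
  unfold pvStep
  split_ifs with h
  · simp
  · omega

lemma pvStep_skip (f : Int → Int) (st : Int × Int) (s : Int) (h : f s ≤ st.1) :
    pvStep f st s = st := by
  unfold pvStep; split_ifs with h' <;> [omega; rfl]

-- a scan over values whose score is never positive stays at (0, 0)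
lemma pvSel_zero (f : Int → Int) (L : List Int) (h : ∀ s ∈ L, f s ≤ 0) :
    pvSel f L = (0, 0) := by
  induction L with
  | nil => rfl
  | cons x xs ih =>
    have hx : pvStep f (0, 0) x = (0, 0) := pvStep_skip f (0, 0) x (h x (by simp))
    simp only [pvSel, List.foldl_cons] at *
    rw [hx, ih (fun s hs => h s (by simp [hs]))]

-- the skipping argument: scanning all of [0, mx] equals scanning only the candidates,
-- because at a non-candidate start the count cannot exceed the previous one
lemma pvSel_range_filter (f : Int → Int) (Pb : Int → Bool) (mx : Int)
    (hP0 : Pb 0 = true)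
    (hmono : ∀ s : Int, 0 < s → s ≤ mx → Pb s = false → f s ≤ f (s - 1)) :
    pvSel f (PySem.List.pyRange 0 (mx + 1)) =
      pvSel f ((PySem.List.pyRange 0 (mx + 1)).filter Pb) := by
  by_cases hmx : mx + 1 ≤ 0
  · rw [PySem.List.pyRange_one_eq_nil hmx]; rfl
  · push_neg at hmx
    have key : ∀ k : Nat, (k : Int) ≤ mx + 1 →
        pvSel f (PySem.List.pyRange 0 (k : Int)) =
          pvSel f ((PySem.List.pyRange 0 (k : Int)).filter Pb) ∧
        (∀ j : Int, 0 ≤ j → j < (k : Int) → f j ≤ (pvSel f (PySem.List.pyRange 0 (k : Int))).1) := by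
      intro k
      induction k with
      | zero =>
        intro _
        have h0 : PySem.List.pyRange 0 ((0 : Nat) : Int) = [] :=
          PySem.List.pyRange_one_eq_nil (by simp)
        rw [h0]
        exact ⟨rfl, fun j hj0 hj1 => by simp at hj1; omega⟩
      | succ k ih =>
        intro hk
        have hk' : (k : Int) ≤ mx + 1 := by push_cast at hk ⊢; omega
        obtain ⟨ihEq, ihMax⟩ := ih hk'
        have hsplit : PySem.List.pyRange 0 ((k : Nat) + 1 : Int) =
            PySem.List.pyRange 0 (k : Int) ++ [(k : Int)] :=
          PySem.List.pyRange_one_succ_right (by positivity)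
        have hcast : (((k + 1 : Nat)) : Int) = ((k : Nat) : Int) + 1 := by push_cast; ring
        rw [hcast, hsplit]
        by_cases hPk : Pb (k : Int) = true
        · have hfil : (PySem.List.pyRange 0 (k : Int) ++ [(k : Int)]).filter Pb =
              (PySem.List.pyRange 0 (k : Int)).filter Pb ++ [(k : Int)] := by
            simp [List.filter_append, hPk]
          rw [hfil]
          simp only [pvSel, List.foldl_append, List.foldl_cons, List.foldl_nil]
          refine ⟨by rw [show List.foldl (pvStep f) (0,0) (PySem.List.pyRange 0 (k:Int)) = _ from ihEq]; rfl, ?_⟩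
          intro j h0 h1
          rcases lt_or_eq_of_le (show j ≤ (k : Int) by omega) with hlt | heq
          · exact le_trans (ihMax j h0 hlt) (pvStep_fst_le f _ _)
          · subst heq; exact pvStep_fst_ge_f f _ _
        · have hPk' : Pb (k : Int) = false := by simpa using hPk
          have hkpos : 0 < (k : Int) := by
            rcases Nat.eq_zero_or_pos k with h | h
            · subst h; simp [hP0] at hPk'
            · exact_mod_cast h
          have hkle : (k : Int) ≤ mx := by omega
          have hfk : f (k : Int) ≤ f ((k : Int) - 1) := hmono _ hkpos hkle hPk'
          have hprev : f ((k : Int) - 1) ≤ (pvSel f (PySem.List.pyRange 0 (k : Int))).1 :=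
            ihMax _ (by omega) (by omega)
          have hskip : pvStep f (pvSel f (PySem.List.pyRange 0 (k : Int))) (k : Int) =
              pvSel f (PySem.List.pyRange 0 (k : Int)) :=
            pvStep_skip f _ _ (le_trans hfk hprev)
          have hfil : (PySem.List.pyRange 0 (k : Int) ++ [(k : Int)]).filter Pb =
              (PySem.List.pyRange 0 (k : Int)).filter Pb := by
            simp [List.filter_append, hPk']
          rw [hfil]
          constructor
          · simp only [pvSel, List.foldl_append, List.foldl_cons, List.foldl_nil]
            rw [show List.foldl (pvStep f) (0,0) (PySem.List.pyRange 0 (k:Int)) = pvSel f (PySem.List.pyRange 0 (k:Int)) from rfl,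
                hskip, ihEq]; rfl
          · intro j h0 h1
            simp only [pvSel, List.foldl_append, List.foldl_cons, List.foldl_nil]
            rw [show List.foldl (pvStep f) (0,0) (PySem.List.pyRange 0 (k:Int)) = pvSel f (PySem.List.pyRange 0 (k:Int)) from rfl,
                hskip]
            rcases lt_or_eq_of_le (show j ≤ (k : Int) by omega) with hlt | heq
            · exact ihMax j h0 hlt
            · subst heq; exact le_trans hfk hprev
    have := key (mx + 1).toNat (by omega)
    rw [Int.toNat_of_nonneg (by omega)] at this
    exact this.1

-- A's port, rewritten as the abstract scan of pvCnt over the full range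
lemma bestA_eq_sel (txs : List Int) (t : Int) (mx : Int)
    (hne : txs ≠ []) (hmax : PySem.List.max? txs (fun x => x) = some mx) :
    best_interval1 txs t =
      ((pvSel (pvCnt txs t) (PySem.List.pyRange 0 (mx + 1))).2,
       (pvSel (pvCnt txs t) (PySem.List.pyRange 0 (mx + 1))).1) := by
  unfold best_interval1
  rw [if_neg hne, hmax]
  have hinner : ∀ number : Int,
      (PySem.List.pyRange 0 (PySem.List.len txs)).foldl
        (fun count index =>
          if number + t ≥ PySem.List.pyGetD txs index 0 ∧
             PySem.List.pyGetD txs index 0 ≥ number then count + 1 else count)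
        (0 : Int) = pvCnt txs t number := by
    intro number
    rw [PySem.List.foldl_pyRange_pyGetD txs 0
        (fun count v => if number + t ≥ v ∧ v ≥ number then count + 1 else count) 0 le_rfl]
    simp only [Int.toNat_zero, List.drop_zero]
    have : List.foldl (fun count v => if number + t ≥ v ∧ v ≥ number then count + 1 else count) (0 : Int) txs
        = List.foldl (fun count v => if (fun v => decide (number ≤ v ∧ v ≤ number + t)) v = true then count + 1 else count) (0 : Int) txs := by
      apply PySem.List.foldl_congr_mem
      intro acc x _
      by_cases h : number ≤ x ∧ x ≤ number + t
      · rw [if_pos ⟨h.2, h.1⟩, if_pos (by simpa using h)]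
      · rw [if_neg (by omega), if_neg (by simpa using h)]
    rw [this, PySem.List.foldl_count_if]
    simp [pvCnt]
  have : (PySem.List.pyRange 0 (mx + 1)).foldl
      (fun (st : Int × Int) number =>
        if (PySem.List.pyRange 0 (PySem.List.len txs)).foldl
            (fun count index =>
              if number + t ≥ PySem.List.pyGetD txs index 0 ∧
                 PySem.List.pyGetD txs index 0 ≥ number then count + 1 else count)
            (0 : Int) > st.1 then
          ((PySem.List.pyRange 0 (PySem.List.len txs)).foldl
            (fun count index =>
              if number + t ≥ PySem.List.pyGetD txs index 0 ∧
                 PySem.List.pyGetD txs index 0 ≥ number then count + 1 else count)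
            (0 : Int), number)
        else st) ((0 : Int), (0 : Int))
      = pvSel (pvCnt txs t) (PySem.List.pyRange 0 (mx + 1)) := by
    apply PySem.List.foldl_congr_mem
    intro acc x _
    rw [hinner x]; rfl
  simpa using congrArg (fun p : Int × Int => (p.2, p.1)) this

-- the start set B builds, characterised
lemma mem_starts (txs : List Int) (t y : Int) :
    y ∈ txs.foldl (fun st v => let s := v - t; if s > 0 then PySem.Set.add st s else st)
        (PySem.Set.ofList [0]) ↔ y = 0 ∨ (0 < y ∧ y + t ∈ txs) := by
  have gen : ∀ (l : List Int) (st : PySem.Set Int),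
      y ∈ l.foldl (fun st v => let s := v - t; if s > 0 then PySem.Set.add st s else st) st ↔
        y ∈ st ∨ ∃ v ∈ l, v - t > 0 ∧ y = v - t := by
    intro l
    induction l with
    | nil => intro st; simp
    | cons x xs ih =>
      intro st
      simp only [List.foldl_cons]
      by_cases hx : x - t > 0
      · simp only [hx, if_pos, ih, PySem.Set.mem_add]
        constructor
        · rintro (⟨h | h⟩ | ⟨v, hv, h1, h2⟩)
          · exact Or.inl h
          · exact Or.inr ⟨x, by simp, hx, h⟩
          · exact Or.inr ⟨v, by simp [hv], h1, h2⟩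
        · rintro (h | ⟨v, hv, h1, h2⟩)
          · exact Or.inl (Or.inl h)
          · rcases List.mem_cons.mp hv with rfl | hv'
            · exact Or.inl (Or.inr h2)
            · exact Or.inr ⟨v, hv', h1, h2⟩
      · simp only [hx, ih]
        constructor
        · rintro (h | ⟨v, hv, h1, h2⟩)
          · exact Or.inl h
          · exact Or.inr ⟨v, by simp [hv], h1, h2⟩
        · rintro (h | ⟨v, hv, h1, h2⟩)
          · exact Or.inl h
          · rcases List.mem_cons.mp hv with rfl | hv'
            · exact absurd h1 hx
            · exact Or.inr ⟨v, hv', h1, h2⟩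
  rw [gen txs (PySem.Set.ofList [0])]
  rw [PySem.Set.mem_ofList]
  constructor
  · rintro (h | ⟨v, hv, h1, h2⟩)
    · simp at h; exact Or.inl h
    · exact Or.inr ⟨by omega, by rw [show y + t = v by omega]; exact hv⟩
  · rintro (h | ⟨h1, h2⟩)
    · exact Or.inl (by simp [h])
    · exact Or.inr ⟨y + t, h2, by omega, by omega⟩

lemma nodup_starts (txs : List Int) (t : Int) :
    (txs.foldl (fun st v => let s := v - t; if s > 0 then PySem.Set.add st s else st)
        (PySem.Set.ofList [0])).Nodup := by
  have gen : ∀ (l : List Int) (st : PySem.Set Int), st.Nodup →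
      (l.foldl (fun st v => let s := v - t; if s > 0 then PySem.Set.add st s else st) st).Nodup := by
    intro l
    induction l with
    | nil => intro st h; exact h
    | cons x xs ih =>
      intro st h
      simp only [List.foldl_cons]
      by_cases hx : x - t > 0
      · simp only [hx, if_pos]; exact ih _ (PySem.Set.nodup_add st _ h)
      · simp only [hx]; exact ih _ h
  exact gen txs _ (PySem.Set.nodup_ofList [0])

-- B's port, rewritten as the abstract scan of pvCnt over the sorted start set
lemma bestB_eq_sel (txs : List Int) (t : Int) :
    best_interval1_alt txs t =
      ((pvSel (pvCnt txs t) (PySem.List.sorted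
          (txs.foldl (fun st v => let s := v - t; if s > 0 then PySem.Set.add st s else st)
            (PySem.Set.ofList [0])) (fun x => x))).2,
       (pvSel (pvCnt txs t) (PySem.List.sorted
          (txs.foldl (fun st v => let s := v - t; if s > 0 then PySem.Set.add st s else st)
            (PySem.Set.ofList [0])) (fun x => x))).1) := by
  unfold best_interval1_alt
  have hinner : ∀ s : Int,
      txs.foldl (fun c v => if s ≤ v ∧ v ≤ s + t then c + 1 else c) (0 : Int) = pvCnt txs t s := by
    intro s
    have : List.foldl (fun c v => if s ≤ v ∧ v ≤ s + t then c + 1 else c) (0 : Int) txs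
        = List.foldl (fun c v => if (fun v => decide (s ≤ v ∧ v ≤ s + t)) v = true then c + 1 else c) (0 : Int) txs := by
      apply PySem.List.foldl_congr_mem
      intro acc x _
      by_cases h : s ≤ x ∧ x ≤ s + t
      · rw [if_pos h, if_pos (by simpa using h)]
      · rw [if_neg h, if_neg (by simpa using h)]
    rw [this, PySem.List.foldl_count_if]
    simp [pvCnt]
  have : (PySem.List.sorted
          (txs.foldl (fun st v => let s := v - t; if s > 0 then PySem.Set.add st s else st)
            (PySem.Set.ofList [0])) (fun x => x)).foldl
      (fun (st : Int × Int) s =>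
        if txs.foldl (fun c v => if s ≤ v ∧ v ≤ s + t then c + 1 else c) (0 : Int) > st.1 then
          (txs.foldl (fun c v => if s ≤ v ∧ v ≤ s + t then c + 1 else c) (0 : Int), s)
        else st) ((0 : Int), (0 : Int))
      = pvSel (pvCnt txs t) (PySem.List.sorted
          (txs.foldl (fun st v => let s := v - t; if s > 0 then PySem.Set.add st s else st)
            (PySem.Set.ofList [0])) (fun x => x)) := by
    apply PySem.List.foldl_congr_mem
    intro acc x _
    rw [hinner x]; rfl
  simpa using congrArg (fun p : Int × Int => (p.2, p.1)) this

-- the count is zero when the window is empty (t < 0)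
lemma pvCnt_zero_of_neg_t (txs : List Int) (t s : Int) (ht : t < 0) : pvCnt txs t s = 0 := by
  unfold pvCnt
  rw [List.countP_eq_zero.mpr]
  · rfl
  · intro v _; simp; omega

-- monotone-skip fact: at a non-candidate positive start the count does not increase (t ≥ 0)
lemma pvCnt_mono_skip (txs : List Int) (t s : Int)
    (hnc : pvCand txs t s = false) (hs : 0 < s) :
    pvCnt txs t s ≤ pvCnt txs t (s - 1) := by
  have hnotin : s + t ∉ txs := by
    unfold pvCand at hnc
    simp only [decide_eq_false_iff_not] at hnc
    push_neg at hnc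
    exact hnc.2 hs
  unfold pvCnt
  have : txs.countP (fun v => decide (s ≤ v ∧ v ≤ s + t)) ≤
      txs.countP (fun v => decide (s - 1 ≤ v ∧ v ≤ s - 1 + t)) := by
    apply List.countP_mono_left
    intro v hv h
    simp only [decide_eq_true_eq] at h ⊢
    have hne : v ≠ s + t := fun he => hnotin (he ▸ hv)
    omega
  exact_mod_cast this

-- pyRange 0 n is strictly increasing
lemma pyRange_pairwise_lt (n : Int) : List.Pairwise (· < ·) (PySem.List.pyRange 0 n) := by
  by_cases hn : n ≤ 0
  · rw [PySem.List.pyRange_one_eq_nil hn]; exact List.Pairwise.nil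
  · push_neg at hn
    have : n = ((n.toNat : Nat) : Int) := by omega
    rw [this, PySem.List.pyRange_zero_natCast]
    exact List.pairwise_lt_range.map _ (fun _ _ h => by exact_mod_cast h)

-- in the main case (t ≥ 0, 0 ≤ mx = max) the sorted start set is exactly the candidate
-- sublist of [0, mx]
lemma sorted_starts_eq_filter (txs : List Int) (t mx : Int) (ht : 0 ≤ t) (hmx : 0 ≤ mx)
    (hub : ∀ v ∈ txs, v ≤ mx) :
    PySem.List.sorted
        (txs.foldl (fun st v => let s := v - t; if s > 0 then PySem.Set.add st s else st)
          (PySem.Set.ofList [0])) (fun x => x) =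
      (PySem.List.pyRange 0 (mx + 1)).filter (pvCand txs t) := by
  apply PySem.List.sorted_eq_of_perm_of_pairwise_lt
  · rw [List.perm_ext_iff_of_nodup
      (List.Nodup.filter _ (pyRange_pairwise_lt (mx + 1)).nodup)
      (nodup_starts txs t)]
    intro y
    rw [List.mem_filter, PySem.List.mem_pyRange_one, mem_starts]
    unfold pvCand
    simp only [decide_eq_true_eq]
    constructor
    · rintro ⟨_, h⟩; exact h
    · rintro (rfl | ⟨h1, h2⟩)
      · exact ⟨⟨le_rfl, by omega⟩, Or.inl rfl⟩
      · have := hub _ h2; exact ⟨⟨by omega, by omega⟩, Or.inr ⟨h1, h2⟩⟩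
  · exact (pyRange_pairwise_lt (mx + 1)).filter _

-- ===== VERDICT (by name: the statement is the Claim_ definition above) =====
theorem best_interval1_spec : Claim_equal_best_interval1 := by
  intro txs t _
  unfold Spec_best_interval1
  by_cases hne : txs = []
  · subst hne
    have : best_interval1_alt [] t = (0, 0) := by
      rw [bestB_eq_sel, pvSel_zero _ _ (fun s _ => by simp [pvCnt])]
    rw [this]; rfl
  · obtain ⟨mx, hmax⟩ : ∃ mx, PySem.List.max? txs (fun x => x) = some mx := by
      cases h : PySem.List.max? txs (fun x => x) with
      | none => exact absurd ((PySem.List.max?_eq_none_iff _ _).mp h) hne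
      | some m => exact ⟨m, rfl⟩
    have hub : ∀ v ∈ txs, v ≤ mx := PySem.List.max?_isMax hmax
    rw [bestA_eq_sel txs t mx hne hmax, bestB_eq_sel]
    by_cases ht : t < 0
    · rw [pvSel_zero _ _ (fun s _ => le_of_eq (pvCnt_zero_of_neg_t txs t s ht)),
        pvSel_zero _ _ (fun s _ => le_of_eq (pvCnt_zero_of_neg_t txs t s ht))]
    · push_neg at ht
      by_cases hmx : mx < 0
      · -- every transaction is negative: A's range is empty, B's counts are all zero
        have hz : ∀ s ∈ PySem.List.sorted
            (txs.foldl (fun st v => let s := v - t; if s > 0 then PySem.Set.add st s else st)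
              (PySem.Set.ofList [0])) (fun x => x), pvCnt txs t s ≤ 0 := by
          intro s hs
          have hs0 : 0 ≤ s := by
            have := (mem_starts txs t s).mp ((PySem.List.sorted_perm _ _ _).mem_iff.mp hs)
            rcases this with rfl | ⟨h, _⟩ <;> omega
          apply le_of_eq
          unfold pvCnt
          rw [List.countP_eq_zero.mpr]
          · rfl
          · intro v hv
            have := hub v hv
            simp
            omega
        rw [PySem.List.pyRange_one_eq_nil (show mx + 1 ≤ 0 by omega), pvSel_zero _ _ hz]
        rfl
      · push_neg at hmx
        rw [sorted_starts_eq_filter txs t mx ht hmx hub]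
        rw [pvSel_range_filter (pvCnt txs t) (pvCand txs t) mx (by unfold pvCand; simp)
          (fun s hs hsmx hnc => pvCnt_mono_skip txs t s hnc hs)]
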